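-- pv_equiv track=rewrite | github.com/clickbait-challenge/blobfish | feature2vec.py | count_big_POS
-- ===== SOURCE A (Python) =====
-- def count_big_POS(array, type1, type2):
--     """ Count the number of occurrence of bigram of POS
--     Parameters
--     ----------
--     array : list
--         the list of tuples of the sentence
--     type1 : string
--         Part of Speech tag used by Penn Treebank project
--     type2 : string
--         Part of Speech tag used by Penn Treebank project
--     """
--     bigCount = 0
--     count = 0
--     if type1 == type2:
--         for a in array:
--             if a[1] == type1:
--                 if count == 1:
--                     bigCount = bigCount + 1
--                 else:
--                     count = count + 1
--             else:
--                 count = 0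
--         return bigCount
--     else:
--         for a in array:
--             if a[1] == type1:
--                 count = 1
--             if count == 1 and a[1] != type2 and a[1] != type1:
--                 count = 0
--             if a[1] == type2 and count == 1:
--                 bigCount = bigCount + 1
--         return bigCount
-- ===== SOURCE B (Python) =====
-- def count_big_POS(array, type1, type2):
--     """Count adjacent (type1, type2) POS bigrams with one uniform pairwise pass."""
--     count = 0
--     prev = None
--     for a in array:
--         if prev is not None and prev[1] == type1 and a[1] == type2:
--             count += 1
--         prev = a
--     return count
-- ===== Notes on version B (the rewrite author's own statement) =====
-- stated objective: simpler
-- what changed: B collapses A's two-branch flag state machine into one uniform pairwise pass that remembers only the previous element and counts positions where the previous tag is type1 and the current tag is type2.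
-- intended difference: When type1 != type2 and a tag-type1 element is followed (through tags all type1/type2) by two adjacent tag-type2 elements, A counts every type2 element of such a run (e.g. 2 for tags N,V,V with type1='N', type2='V') while B returns the number of adjacent (type1,type2) pairs (1 there), which is the bigram count the docstring intends. — e.g. on count_big_POS([("a", "N"), ("b", "V"), ("c", "V")], "N", "V"): A returns 2, B returns 1
import Mathlib
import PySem

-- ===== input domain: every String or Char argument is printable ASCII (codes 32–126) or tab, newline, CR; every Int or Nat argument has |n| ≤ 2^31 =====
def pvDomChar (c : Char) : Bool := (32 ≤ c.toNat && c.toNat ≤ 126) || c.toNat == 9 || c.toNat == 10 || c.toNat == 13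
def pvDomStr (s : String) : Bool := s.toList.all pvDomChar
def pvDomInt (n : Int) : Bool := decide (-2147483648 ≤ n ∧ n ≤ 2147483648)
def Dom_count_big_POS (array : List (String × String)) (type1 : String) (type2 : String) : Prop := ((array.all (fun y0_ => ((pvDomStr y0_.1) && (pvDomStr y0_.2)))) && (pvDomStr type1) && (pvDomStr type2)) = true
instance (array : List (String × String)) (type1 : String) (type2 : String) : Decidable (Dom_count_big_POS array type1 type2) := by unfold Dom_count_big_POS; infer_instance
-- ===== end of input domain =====

-- B replaces A's two-branch flag state machine by one uniform pairwise pass (count positions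
-- whose previous tag is type1 and whose own tag is type2); objective: simpler. On the inputs
-- described by D_ below, A overcounts and B returns the intended bigram count.

-- ===== PORT A =====
-- loop body of A's first branch (type1 == type2); state = (bigCount, count)
def stepA1 (type1 : String) (s : Int × Int) (a : String × String) : Int × Int :=
  if a.2 == type1 then
    if s.2 == 1 then (s.1 + 1, s.2) else (s.1, s.2 + 1)
  else (s.1, 0)

-- loop body of A's second branch (type1 != type2); the three ifs in their order
def stepA2 (type1 type2 : String) (s : Int × Int) (a : String × String) : Int × Int :=
  let count := if a.2 == type1 then 1 else s.2
  let count := if count == 1 && !(a.2 == type2) && !(a.2 == type1) then 0 else count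
  let bigCount := if a.2 == type2 && count == 1 then s.1 + 1 else s.1
  (bigCount, count)

def count_big_POS (array : List (String × String)) (type1 : String) (type2 : String) : Int :=
  if type1 == type2 then
    (array.foldl (stepA1 type1) (0, 0)).1
  else
    (array.foldl (stepA2 type1 type2) (0, 0)).1

-- ===== PORT B =====
-- loop body of B: state = (count, prev); prev is None before the first element
def stepB (type1 type2 : String) (s : Int × Option (String × String)) (a : String × String) :
    Int × Option (String × String) :=
  ((match s.2 with
    | some p => if p.2 == type1 && a.2 == type2 then s.1 + 1 else s.1
    | none => s.1), some a)

def count_big_POS_alt (array : List (String × String)) (type1 : String) (type2 : String) : Int :=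
  (array.foldl (stepB type1 type2) (0, none)).1

-- ===== PRECONDITION & SPEC =====
-- When type1 ≠ type2 and some tag-type1 element is followed (through tags that are all
-- type1/type2) by two adjacent tag-type2 elements, A counts every type2 element of such a run
-- and returns more than the number of adjacent (type1,type2) tag pairs, which B returns;
-- B's value is the bigram count the docstring intends.
def D_count_big_POS (array : List (String × String)) (type1 : String) (type2 : String) : Prop :=
  ¬ type1 = type2 ∧
  ∃ i < array.length, i + 1 < array.length ∧
    (array.getD i ("", "")).2 = type2 ∧ (array.getD (i + 1) ("", "")).2 = type2 ∧
    ∃ j < i, (array.getD j ("", "")).2 = type1 ∧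
      ∀ m < i, j < m →
        ((array.getD m ("", "")).2 = type1 ∨ (array.getD m ("", "")).2 = type2)

instance (array : List (String × String)) (type1 : String) (type2 : String) :
    Decidable (D_count_big_POS array type1 type2) := by unfold D_count_big_POS; infer_instance

def Spec_count_big_POS (array : List (String × String)) (type1 : String) (type2 : String) (out : Int) : Prop := ¬ D_count_big_POS array type1 type2 → out = count_big_POS_alt array type1 type2
instance (array : List (String × String)) (type1 : String) (type2 : String) (out : Int) : Decidable (Spec_count_big_POS array type1 type2 out) := by unfold Spec_count_big_POS; infer_instance

def pvDiffWitness_count_big_POS : (List (String × String)) × String × String :=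
  ([("a", "N"), ("b", "V"), ("c", "V")], "N", "V")
def pvDiffWitnessOut_count_big_POS : Int × Int := (2, 1)

-- ===== CLAIM (what is proved, stated in full; the proofs are below) =====
def Claim_unchanged_count_big_POS : Prop := ∀ (array : List (String × String)) (type1 : String) (type2 : String), Dom_count_big_POS array type1 type2 → Spec_count_big_POS array type1 type2 (count_big_POS array type1 type2)
def Claim_changed_count_big_POS : Prop := Dom_count_big_POS (pvDiffWitness_count_big_POS.1) (pvDiffWitness_count_big_POS.2.1) (pvDiffWitness_count_big_POS.2.2) ∧ D_count_big_POS (pvDiffWitness_count_big_POS.1) (pvDiffWitness_count_big_POS.2.1) (pvDiffWitness_count_big_POS.2.2) ∧ count_big_POS (pvDiffWitness_count_big_POS.1) (pvDiffWitness_count_big_POS.2.1) (pvDiffWitness_count_big_POS.2.2) = pvDiffWitnessOut_count_big_POS.1 ∧ count_big_POS_alt (pvDiffWitness_count_big_POS.1) (pvDiffWitness_count_big_POS.2.1) (pvDiffWitness_count_big_POS.2.2) = pvDiffWitnessOut_count_big_POS.2 ∧ pvDiffWitnessOut_count_big_POS.1 ≠ pvDiffWitnessOut_count_big_POS.2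
def Claim_exact_count_big_POS : Prop := ∀ (array : List (String × String)) (type1 : String) (type2 : String), Dom_count_big_POS array type1 type2 → D_count_big_POS array type1 type2 → count_big_POS array type1 type2 ≠ count_big_POS_alt array type1 type2

-- ===== LEMMAS AND PROOFS =====

-- Branch type1 = type2: A's flag is 1 exactly when the previous tag matched type1.
theorem main1 (type1 : String) :
    ∀ (l : List (String × String)) (big : Int) (p : String × String),
      (l.foldl (stepA1 type1) (big, if p.2 == type1 then 1 else 0)).1
        = (l.foldl (stepB type1 type1) (big, some p)).1 := by
  intro l
  induction l with
  | nil => intro big p; rfl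
  | cons a rest ih =>
    intro big p
    by_cases hp : p.2 = type1 <;> by_cases ha : a.2 = type1 <;>
      (simp [stepA1, stepB, hp, ha]; simpa [ha] using ih _ a)

-- "A discrepancy pattern still lies ahead" scanner for the second branch:
-- alive is A's flag, prev the tag of the element just consumed.
def patB (type1 type2 : String) : Bool → String → List (String × String) → Bool
  | _, _, [] => false
  | alive, prev, a :: rest =>
    (alive && prev == type2 && a.2 == type2) ||
      patB type1 type2
        (if a.2 == type1 then true else if a.2 == type2 then alive else false) a.2 rest

-- Branch type1 ≠ type2, main invariant: while no pattern lies ahead, A and B agree.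
theorem main2 (type1 type2 : String) (h12 : ¬ type1 = type2) :
    ∀ (l : List (String × String)) (big : Int) (alive : Bool) (p : String × String),
      (alive = true → p.2 = type1 ∨ p.2 = type2) →
      (p.2 = type1 → alive = true) →
      patB type1 type2 alive p.2 l = false →
      (l.foldl (stepA2 type1 type2) (big, if alive then 1 else 0)).1
        = (l.foldl (stepB type1 type2) (big, some p)).1 := by
  intro l
  induction l with
  | nil => intro big alive p _ _ _; rfl
  | cons a rest ih =>
    intro big alive p hinv1 hinv2 hpat
    have h21 : ¬ type2 = type1 := fun h => h12 h.symm
    simp only [patB, Bool.or_eq_false_iff, Bool.and_eq_false_iff, beq_eq_false_iff_ne, ne_eq] at hpat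
    obtain ⟨hhead, htail⟩ := hpat
    by_cases ha1 : a.2 = type1
    · have ha2 : ¬ a.2 = type2 := by rw [ha1]; exact h12
      simp [ha1] at htail
      simp [stepA2, stepB, ha1, h12]
      simpa using ih big true a (fun _ => Or.inl ha1) (fun _ => rfl) (by rw [ha1]; simpa using htail)
    · by_cases ha2 : a.2 = type2
      · simp [ha2] at htail
        cases alive with
        | true =>
          have hp1 : p.2 = type1 := by
            rcases hinv1 rfl with h | h
            · exact h
            · rcases hhead with (h' | h') | h' <;> simp_all
          simp [stepA2, stepB, ha2, hp1, h21]
          simpa using ih (big + 1) true a (fun _ => Or.inr ha2) (fun h => absurd h ha1) (by rw [ha2]; simpa [h21] using htail)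
        | false =>
          have hp1 : ¬ p.2 = type1 := fun h => by simpa using hinv2 h
          simp [stepA2, stepB, ha2, hp1, h21]
          simpa using ih big false a (fun h => nomatch h) (fun h => absurd h ha1) (by rw [ha2]; simpa [h21] using htail)
      · simp [ha1, ha2] at htail
        cases alive <;>
          (simp [stepA2, stepB, ha1, ha2]
           simpa using ih big false a (fun h => nomatch h) (fun h => absurd h ha1) htail)

-- If the scanner fires at position k of array, the whole-array pattern D_ holds.
theorem patB_implies_D (type1 type2 : String) (h12 : ¬ type1 = type2) :
    ∀ (l : List (String × String)) (array : List (String × String)) (k : Nat) (alive : Bool),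
      array.drop (k + 1) = l →
      k < array.length →
      (alive = true → ∃ j ≤ k, (array.getD j ("", "")).2 = type1 ∧
        ∀ m ≤ k, j < m → ((array.getD m ("", "")).2 = type1 ∨ (array.getD m ("", "")).2 = type2)) →
      patB type1 type2 alive (array.getD k ("", "")).2 l = true →
      D_count_big_POS array type1 type2 := by
  intro l
  induction l with
  | nil => intro array k alive _ _ _ hpat; simp [patB] at hpat
  | cons a rest ih =>
    intro array k alive hdrop hk halive hpat
    have h21 : ¬ type2 = type1 := fun h => h12 h.symm
    have hk1 : k + 1 < array.length := by
      by_contra h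
      have : array.drop (k + 1) = [] := List.drop_eq_nil_of_le (by omega)
      rw [hdrop] at this; simp at this
    have hget : array.getD (k + 1) ("", "") = a := by
      have h0 : some a = array[k + 1 + 0]? := by
        rw [← List.getElem?_drop, hdrop]; rfl
      simp only [Nat.add_zero] at h0
      simp [List.getD_eq_getElem?_getD, ← h0]
    simp only [patB, Bool.or_eq_true, Bool.and_eq_true, beq_iff_eq] at hpat
    rcases hpat with ⟨⟨hal, hkt2⟩, hat2⟩ | hrec
    · obtain ⟨j, hj, hjt1, hchain⟩ := halive hal
      have hjk : j < k := by
        rcases Nat.lt_or_ge j k with h | h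
        · exact h
        · exfalso
          have : j = k := by omega
          rw [this, hkt2] at hjt1; exact h12 hjt1.symm
      refine ⟨h12, k, hk, hk1, hkt2, by rw [hget]; exact hat2, j, hjk, hjt1, ?_⟩
      intro m hm hjm
      exact hchain m (by omega) hjm
    · refine ih array (k + 1) (if a.2 = type1 then true else if a.2 = type2 then alive else false) ?_ hk1 ?_ ?_
      · rw [← List.drop_drop, hdrop]; rfl
      · intro halive'
        by_cases hat1 : a.2 = type1
        · exact ⟨k + 1, le_refl _, by rw [hget]; exact hat1, fun m hm hlt => by omega⟩
        · by_cases hat2 : a.2 = type2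
          · have hal : alive = true := by simpa [hat1, hat2, h21] using halive'
            obtain ⟨j, hj, hjt1, hchain⟩ := halive hal
            refine ⟨j, by omega, hjt1, ?_⟩
            intro m hm hjm
            rcases Nat.lt_or_ge m (k + 1) with h | h
            · exact hchain m (by omega) hjm
            · have : m = k + 1 := by omega
              rw [this, hget]; exact Or.inr hat2
          · simp [hat1, hat2] at halive'
      · rw [hget]
        exact hrec

-- A never falls behind B: per step A's increment dominates B's.
theorem geLem (type1 type2 : String) (h12 : ¬ type1 = type2) :
    ∀ (l : List (String × String)) (k bigA bigB : Int) (alive : Bool) (p : String × String),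
      (p.2 = type1 → alive = true) → bigA ≥ bigB + k →
      (l.foldl (stepA2 type1 type2) (bigA, if alive then 1 else 0)).1
        ≥ (l.foldl (stepB type1 type2) (bigB, some p)).1 + k := by
  intro l
  induction l with
  | nil => intro k bigA bigB alive p _ h; simpa using h
  | cons a rest ih =>
    intro k bigA bigB alive p hinv2 hge
    have h21 : ¬ type2 = type1 := fun h => h12 h.symm
    by_cases ha1 : a.2 = type1
    · have ha2 : ¬ a.2 = type2 := by rw [ha1]; exact h12
      simp [stepA2, stepB, ha1, h12]
      simpa using ih k bigA bigB true a (fun _ => rfl) hge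
    · by_cases ha2 : a.2 = type2
      · cases alive with
        | true =>
          by_cases hp : p.2 = type1
          · simp [stepA2, stepB, ha2, hp, h21]
            simpa using ih k (bigA + 1) (bigB + 1) true a (fun h => absurd h ha1) (by omega)
          · simp [stepA2, stepB, ha2, hp, h21]
            simpa using ih k (bigA + 1) bigB true a (fun h => absurd h ha1) (by omega)
        | false =>
          have hp : ¬ p.2 = type1 := fun h => by simpa using hinv2 h
          simp [stepA2, stepB, ha2, hp, h21]
          simpa using ih k bigA bigB false a (fun h => absurd h ha1) hge
      · cases alive <;>
          (simp [stepA2, stepB, ha1, ha2]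
           simpa using ih k bigA bigB false a (fun h => absurd h ha1) hge)

-- If a discrepancy pattern lies ahead, A ends strictly ahead of B.
theorem gtLem (type1 type2 : String) (h12 : ¬ type1 = type2) :
    ∀ (l : List (String × String)) (bigA bigB : Int) (alive : Bool) (p : String × String),
      (p.2 = type1 → alive = true) →
      bigA ≥ bigB →
      patB type1 type2 alive p.2 l = true →
      (l.foldl (stepA2 type1 type2) (bigA, if alive then 1 else 0)).1
        ≥ (l.foldl (stepB type1 type2) (bigB, some p)).1 + 1 := by
  intro l
  induction l with
  | nil => intro bigA bigB alive p _ _ hpat; simp [patB] at hpat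
  | cons a rest ih =>
    intro bigA bigB alive p hinv2 hge hpat
    have h21 : ¬ type2 = type1 := fun h => h12 h.symm
    simp only [patB, Bool.or_eq_true, Bool.and_eq_true, beq_iff_eq] at hpat
    rcases hpat with ⟨⟨hal, hpt2⟩, hat2⟩ | hrec
    · -- firing step: A increments, B does not
      have hp : ¬ p.2 = type1 := by rw [hpt2]; exact h21
      rw [hal]
      simp [stepA2, stepB, hat2, hp, h21]
      simpa using geLem type1 type2 h12 rest 1 (bigA + 1) bigB true a
        (fun h => absurd h (by rw [hat2]; exact h21)) (by omega)
    · by_cases ha1 : a.2 = type1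
      · have ha2 : ¬ a.2 = type2 := by rw [ha1]; exact h12
        simp [stepA2, stepB, ha1, h12]
        simpa using ih bigA bigB true a (fun _ => rfl) hge (by simpa [ha1] using hrec)
      · by_cases ha2 : a.2 = type2
        · cases alive with
          | true =>
            by_cases hp : p.2 = type1
            · simp [stepA2, stepB, ha2, hp, h21]
              simpa using ih (bigA + 1) (bigB + 1) true a (fun h => absurd h ha1) (by omega)
                (by simpa [ha1, ha2, h21] using hrec)
            · simp [stepA2, stepB, ha2, hp, h21]
              simpa using ih (bigA + 1) bigB true a (fun h => absurd h ha1) (by omega)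
                (by simpa [ha1, ha2, h21] using hrec)
          | false =>
            have hp : ¬ p.2 = type1 := fun h => by simpa using hinv2 h
            simp [stepA2, stepB, ha2, hp, h21]
            simpa using ih bigA bigB false a (fun h => absurd h ha1) hge
              (by simpa [ha1, ha2, h21] using hrec)
        · cases alive <;>
            (simp [stepA2, stepB, ha1, ha2]
             simpa using ih bigA bigB false a (fun h => absurd h ha1) hge
               (by simpa [ha1, ha2] using hrec))

-- Converse: the whole-array pattern D_ makes the scanner fire.
theorem D_implies_patB (type1 type2 : String) :
    ∀ (l array : List (String × String)) (k : Nat) (alive : Bool),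
      array.drop (k + 1) = l →
      ((∃ j ≤ k, (array.getD j ("", "")).2 = type1 ∧
        ∀ m ≤ k, j < m → ((array.getD m ("", "")).2 = type1 ∨ (array.getD m ("", "")).2 = type2)) → alive = true) →
      (∃ i, k ≤ i ∧ i + 1 < array.length ∧
        (array.getD i ("", "")).2 = type2 ∧ (array.getD (i + 1) ("", "")).2 = type2 ∧
        ∃ j < i, (array.getD j ("", "")).2 = type1 ∧
          ∀ m < i, j < m → ((array.getD m ("", "")).2 = type1 ∨ (array.getD m ("", "")).2 = type2)) →
      patB type1 type2 alive (array.getD k ("", "")).2 l = true := by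
  intro l
  induction l with
  | nil =>
    intro array k alive hdrop _ hex
    obtain ⟨i, hki, hi1, _⟩ := hex
    have hlen : array.length ≤ k + 1 := List.drop_eq_nil_iff.mp hdrop
    omega
  | cons a rest ih =>
    intro array k alive hdrop halive hex
    obtain ⟨i, hki, hi1, hit2, hit2', j, hji, hjt1, hchain⟩ := hex
    have hget : array.getD (k + 1) ("", "") = a := by
      have h0 : some a = array[k + 1 + 0]? := by
        rw [← List.getElem?_drop, hdrop]; rfl
      simp only [Nat.add_zero] at h0
      simp [List.getD_eq_getElem?_getD, ← h0]
    simp only [patB, Bool.or_eq_true, Bool.and_eq_true, beq_iff_eq]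
    rcases Nat.eq_or_lt_of_le hki with heq | hlt
    · -- k = i: the scanner fires on the very next element
      left
      refine ⟨⟨halive ⟨j, by omega, hjt1, ?_⟩, by rw [← heq] at hit2; exact hit2⟩, ?_⟩
      · intro m hm hjm
        rcases Nat.lt_or_ge m i with h | h
        · exact hchain m h hjm
        · have : m = i := by omega
          rw [this]; exact Or.inr hit2
      · rw [← heq] at hit2'; rw [← hget]; exact hit2'
    · -- k < i: recurse
      right
      rw [← hget]
      refine ih array (k + 1) _ ?_ ?_ ⟨i, by omega, hi1, hit2, hit2', j, hji, hjt1, hchain⟩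
      · rw [← List.drop_drop, hdrop]; rfl
      · intro ⟨j', hj', hjt1', hchain'⟩
        by_cases hat1 : a.2 = type1
        · rw [hget]; simp [hat1]
        · by_cases hat2 : a.2 = type2
          · rw [hget]; simp [hat2]
            refine Or.inr (halive ?_)
            rcases Nat.lt_or_ge j' (k + 1) with h | h
            · exact ⟨j', by omega, hjt1', fun m hm hjm => hchain' m (by omega) hjm⟩
            · exfalso
              have : j' = k + 1 := by omega
              rw [this, hget] at hjt1'
              exact hat1 hjt1'
          · exfalso
            have : j' = k + 1 ∨ j' ≤ k := by omega
            rcases this with h | h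
            · rw [h, hget] at hjt1'; exact hat1 hjt1'
            · have := hchain' (k + 1) (le_refl _) (by omega)
              rw [hget] at this
              rcases this with h' | h' <;> [exact hat1 h'; exact hat2 h']


-- ===== VERDICT (by name: the statement is the Claim_ definition above) =====
theorem count_big_POS_spec : Claim_unchanged_count_big_POS := by
  intro array type1 type2 _ hnd
  by_cases h12 : type1 = type2
  · subst h12
    simp only [count_big_POS, count_big_POS_alt, beq_self_eq_true, if_pos]
    cases array with
    | nil => rfl
    | cons a rest =>
      simp only [List.foldl_cons]
      have hA : stepA1 type1 ((0 : Int), (0 : Int)) a = (0, if a.2 == type1 then 1 else 0) := by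
        by_cases ha : a.2 = type1 <;> simp [stepA1, ha]
      rw [hA]
      exact main1 type1 rest 0 a
  · simp only [count_big_POS, count_big_POS_alt, beq_iff_eq, if_neg h12]
    cases array with
    | nil => rfl
    | cons a rest =>
      have hpat : patB type1 type2 (a.2 == type1) a.2 rest = false := by
        by_contra hT
        rw [Bool.not_eq_false] at hT
        exact hnd (patB_implies_D type1 type2 h12 rest (a :: rest) 0 (a.2 == type1) rfl
          (by simp)
          (fun hal => ⟨0, Nat.le_refl 0, by simpa using hal, fun m hm h0 => by omega⟩)
          (by simpa using hT))
      simp only [List.foldl_cons]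
      have hA : stepA2 type1 type2 ((0 : Int), (0 : Int)) a
          = (0, if a.2 == type1 then 1 else 0) := by
        by_cases ha1 : a.2 = type1
        · simp [stepA2, ha1, h12]
        · have h21 : ¬ type2 = type1 := fun h => h12 h.symm
          by_cases ha2 : a.2 = type2 <;> simp [stepA2, ha1, ha2, h21]
      rw [hA]
      have hB : stepB type1 type2 ((0 : Int), none) a = (0, some a) := rfl
      rw [hB]
      exact main2 type1 type2 h12 rest 0 (a.2 == type1) a
        (fun hal => Or.inl (by simpa using hal)) (fun h => by simp [h]) hpat

theorem count_big_POS_changed : Claim_changed_count_big_POS := by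
  unfold Claim_changed_count_big_POS; decide
theorem count_big_POS_tight : Claim_exact_count_big_POS := by
  intro array type1 type2 _ hD
  obtain ⟨h12, i, hi, hi1, hrest⟩ := hD
  cases array with
  | nil => simp at hi
  | cons a rest =>
    have hpat : patB type1 type2 (a.2 == type1) a.2 rest = true := by
      have := D_implies_patB type1 type2 rest (a :: rest) 0 (a.2 == type1) rfl
        (fun ⟨j, hj, hjt1, _⟩ => by
          have : j = 0 := by omega
          rw [this] at hjt1
          simpa using hjt1)
        ⟨i, Nat.zero_le _, hi1, hrest⟩
      simpa using this
    simp only [count_big_POS, count_big_POS_alt, beq_iff_eq, if_neg h12, List.foldl_cons]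
    have hA : stepA2 type1 type2 ((0 : Int), (0 : Int)) a
        = (0, if a.2 == type1 then 1 else 0) := by
      have h21 : ¬ type2 = type1 := fun h => h12 h.symm
      by_cases ha1 : a.2 = type1
      · simp [stepA2, ha1, h12]
      · by_cases ha2 : a.2 = type2 <;> simp [stepA2, ha1, ha2, h21]
    rw [hA]
    have hB : stepB type1 type2 ((0 : Int), none) a = (0, some a) := rfl
    rw [hB]
    have := gtLem type1 type2 h12 rest 0 0 (a.2 == type1) a (fun h => by simp [h]) (le_refl _) hpat
    omega
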